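-- pv_equiv track=rewrite | github.com/punkyfer/3sat_genetic_algorithm | genetic_algorithm/simple_gen_alg.py | trivial_case
-- ===== SOURCE A (Python) =====
-- def trivial_case(clauses):
-- 	num_pos = 0
-- 	num_neg = 0
-- 	for clause in clauses:
-- 		for num in clause:
-- 			if num > 0: num_pos += 1
-- 			else: num_neg += 1
-- 	if num_neg == 0:
-- 		return (True, 1)
-- 	if num_pos == 0:
-- 		return (True, 0)
-- 	return (False, -1)
-- ===== SOURCE B (Python) =====
-- def trivial_case(clauses):
--     TOP, POS, NEG, MIX = 0, 1, 2, 3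
--
--     def meet(a, b):
--         if a == TOP:
--             return b
--         if b == TOP:
--             return a
--         return a if a == b else MIX
--
--     def classify(clause):
--         v = TOP
--         for num in clause:
--             v = meet(v, POS if num > 0 else NEG)
--         return v
--
--     state = TOP
--     for clause in clauses:
--         state = meet(state, classify(clause))
--     if state == TOP or state == POS:
--         return (True, 1)
--     if state == NEG:
--         return (True, 0)
--     return (False, -1)
-- ===== Notes on version B (the rewrite author's own statement) =====
-- stated objective: alternative
-- what changed: Replaces the global positive/negative literal counters with a per-clause classification into a 4-element lattice {TOP,POS,NEG,MIX} combined by an associative meet over clauses, the final lattice value deciding the answer.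
import Mathlib
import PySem

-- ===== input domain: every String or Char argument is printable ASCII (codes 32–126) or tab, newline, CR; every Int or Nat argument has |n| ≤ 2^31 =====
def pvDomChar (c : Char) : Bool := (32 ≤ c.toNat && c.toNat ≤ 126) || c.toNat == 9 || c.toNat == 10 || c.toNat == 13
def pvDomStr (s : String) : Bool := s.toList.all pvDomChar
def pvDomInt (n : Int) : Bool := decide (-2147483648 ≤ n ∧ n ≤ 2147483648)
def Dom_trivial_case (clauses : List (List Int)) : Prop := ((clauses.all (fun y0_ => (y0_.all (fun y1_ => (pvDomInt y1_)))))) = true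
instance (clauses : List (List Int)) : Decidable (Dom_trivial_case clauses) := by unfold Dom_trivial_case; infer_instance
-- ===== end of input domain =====

-- B replaces the global positive/negative counters with a per-clause lattice classification ({TOP,POS,NEG,MIX}) combined by an associative meet (alternative decomposition).


-- ===== PORT A =====
def trivial_case (clauses : List (List Int)) : Bool × Int :=
  let s := clauses.foldl (fun (s : Int × Int) clause =>
    clause.foldl (fun (t : Int × Int) num =>
      if num > 0 then (t.1 + 1, t.2) else (t.1, t.2 + 1)) s) (0, 0)
  if s.2 = 0 then (true, 1)
  else if s.1 = 0 then (true, 0)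
  else (false, -1)

-- ===== PORT B =====
-- lattice codes: 0 = TOP (no literal seen), 1 = POS, 2 = NEG, 3 = MIX
def pvMeet (a b : Int) : Int :=
  if a = 0 then b else if b = 0 then a else if a = b then a else 3

def pvClassify (clause : List Int) : Int :=
  clause.foldl (fun v num => pvMeet v (if num > 0 then 1 else 2)) 0

def trivial_case_alt (clauses : List (List Int)) : Bool × Int :=
  let state := clauses.foldl (fun s clause => pvMeet s (pvClassify clause)) 0
  if state = 0 ∨ state = 1 then (true, 1)
  else if state = 2 then (true, 0)
  else (false, -1)

-- ===== PRECONDITION & SPEC =====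
def Spec_trivial_case (clauses : List (List Int)) (out : Bool × Int) : Prop := out = trivial_case_alt clauses
instance (clauses : List (List Int)) (out : Bool × Int) : Decidable (Spec_trivial_case clauses out) := by unfold Spec_trivial_case; infer_instance

-- ===== CLAIM (what is proved, stated in full; the proofs are below) =====
def Claim_equal_trivial_case : Prop := ∀ (clauses : List (List Int)), Dom_trivial_case clauses → Spec_trivial_case clauses (trivial_case clauses)

-- ===== LEMMAS AND PROOFS =====
theorem pv_countA (l : List Int) (a b : Int) :
    l.foldl (fun (t : Int × Int) num =>
      if num > 0 then (t.1 + 1, t.2) else (t.1, t.2 + 1)) (a, b)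
    = (a + (l.countP (fun x => decide (x > 0)) : Int),
       b + (l.countP (fun x => decide (¬ x > 0)) : Int)) := by
  induction l generalizing a b with
  | nil => simp
  | cons y ys ih =>
    by_cases hy : y > 0
    · simp [List.foldl_cons, hy, ih]; ring_nf
    · simp [List.foldl_cons, hy, ih, show y ≤ 0 by omega]; ring_nf

theorem pv_foldA (clauses : List (List Int)) (s : Int × Int) :
    clauses.foldl (fun (s : Int × Int) clause =>
      clause.foldl (fun (t : Int × Int) num =>
        if num > 0 then (t.1 + 1, t.2) else (t.1, t.2 + 1)) s) s
    = clauses.flatten.foldl (fun (t : Int × Int) num =>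
        if num > 0 then (t.1 + 1, t.2) else (t.1, t.2 + 1)) s := by
  induction clauses generalizing s with
  | nil => simp
  | cons c cs ih => simp [List.foldl_cons, List.flatten_cons, List.foldl_append, ih]

theorem pvMeet_zero (a : Int) : pvMeet a 0 = a := by
  unfold pvMeet; split_ifs <;> omega

theorem pvMeet_zero_left (b : Int) : pvMeet 0 b = b := by
  unfold pvMeet; split_ifs <;> omega

theorem pvMeet_assoc (a b c : Int) : pvMeet (pvMeet a b) c = pvMeet a (pvMeet b c) := by
  unfold pvMeet; split_ifs <;> omega

-- the inner fold from any start equals meet with the classification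
theorem pv_merge (l : List Int) (s : Int) :
    l.foldl (fun v num => pvMeet v (if num > 0 then 1 else 2)) s = pvMeet s (pvClassify l) := by
  induction l generalizing s with
  | nil => exact (pvMeet_zero s).symm
  | cons x xs ih =>
    rw [List.foldl_cons, ih, pvMeet_assoc]
    congr 1
    conv_rhs => rw [pvClassify, List.foldl_cons]
    rw [pvMeet_zero_left, ih]

theorem pv_classify_append (a b : List Int) :
    pvClassify (a ++ b) = pvMeet (pvClassify a) (pvClassify b) := by
  conv_lhs => rw [pvClassify, List.foldl_append]
  rw [pv_merge]
  rfl

-- the outer fold over clauses equals the classification of the flattened literals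
theorem pv_outer (clauses : List (List Int)) (s : Int) :
    clauses.foldl (fun v clause => pvMeet v (pvClassify clause)) s
    = pvMeet s (pvClassify clauses.flatten) := by
  induction clauses generalizing s with
  | nil => exact (pvMeet_zero s).symm
  | cons c cs ih =>
    rw [List.foldl_cons, ih, List.flatten_cons, pv_classify_append, pvMeet_assoc]

theorem pv_classify_cons (x : Int) (xs : List Int) :
    pvClassify (x :: xs) = pvMeet (if x > 0 then 1 else 2) (pvClassify xs) := by
  conv_lhs => rw [pvClassify, List.foldl_cons]
  rw [pv_merge, pvMeet_zero_left]

-- characterization of the classification by the two all-predicates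
theorem pv_classify_eq (l : List Int) :
    pvClassify l = if l = [] then 0
      else if ∀ y ∈ l, y > 0 then 1
      else if ∀ y ∈ l, y ≤ 0 then 2
      else 3 := by
  induction l with
  | nil => simp [pvClassify]
  | cons x xs ih =>
    rw [pv_classify_cons, ih, if_neg (List.cons_ne_nil x xs)]
    rcases eq_or_ne xs [] with hxs | hxs
    · subst hxs
      rw [if_pos rfl, pvMeet_zero]
      by_cases hx : x > 0
      · rw [if_pos hx, if_pos (by simpa using hx)]
      · rw [if_neg hx, if_neg (by simpa using hx), if_pos (by simp; omega)]
    · rw [if_neg hxs]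
      by_cases hp : ∀ y ∈ xs, y > 0
      · rw [if_pos hp]
        by_cases hx : x > 0
        · rw [if_pos hx, if_pos (show ∀ y ∈ x :: xs, y > 0 from List.forall_mem_cons.mpr ⟨hx, hp⟩)]
          decide
        · obtain ⟨w, hw⟩ := List.exists_mem_of_ne_nil xs hxs
          rw [if_neg hx,
            if_neg (show ¬ ∀ y ∈ x :: xs, y > 0 from fun h => hx (h x List.mem_cons_self)),
            if_neg (show ¬ ∀ y ∈ x :: xs, y ≤ 0 from fun h =>
              absurd (hp w hw) (by have := h w (List.mem_cons_of_mem _ hw); omega))]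
          decide
      · rw [if_neg hp]
        obtain ⟨w, hw, hw0⟩ : ∃ y ∈ xs, y ≤ 0 := by
          push Not at hp
          exact ⟨hp.choose, hp.choose_spec.1, by have := hp.choose_spec.2; omega⟩
        have h1 : ¬ ∀ y ∈ x :: xs, y > 0 := fun h =>
          absurd (h w (List.mem_cons_of_mem _ hw)) (by omega)
        by_cases hn : ∀ y ∈ xs, y ≤ 0
        · rw [if_pos hn]
          by_cases hx : x > 0
          · rw [if_pos hx, if_neg h1,
              if_neg (show ¬ ∀ y ∈ x :: xs, y ≤ 0 from fun h =>
                absurd (h x List.mem_cons_self) (by omega))]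
            decide
          · rw [if_neg hx, if_neg h1, if_pos (show ∀ y ∈ x :: xs, y ≤ 0 from List.forall_mem_cons.mpr ⟨by omega, hn⟩)]
            decide
        · rw [if_neg hn]
          obtain ⟨v, hv, hv0⟩ : ∃ y ∈ xs, 0 < y := by push Not at hn; exact hn
          have h2 : ¬ ∀ y ∈ x :: xs, y ≤ 0 := fun h =>
            absurd (h v (List.mem_cons_of_mem _ hv)) (by omega)
          by_cases hx : x > 0 <;> [rw [if_pos hx]; rw [if_neg hx]] <;>
            rw [if_neg h1, if_neg h2] <;> decide

-- ===== VERDICT (by name: the statement is the Claim_ definition above) =====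
theorem trivial_case_spec : Claim_equal_trivial_case := by
  intro clauses _
  unfold Spec_trivial_case trivial_case trivial_case_alt
  simp only [pv_foldA, pv_countA, pv_outer, pvMeet_zero_left, zero_add]
  rw [pv_classify_eq]
  have hneg : (((clauses.flatten.countP (fun x => decide (¬ x > 0))) : Int) = 0)
      ↔ (∀ y ∈ clauses.flatten, y > 0) := by
    rw [show (((clauses.flatten.countP (fun x => decide (¬ x > 0))) : Int) = 0)
        ↔ (clauses.flatten.countP (fun x => decide (¬ x > 0)) = 0) by exact_mod_cast Iff.rfl,
      List.countP_eq_zero]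
    simp
  have hpos : (((clauses.flatten.countP (fun x => decide (x > 0))) : Int) = 0)
      ↔ (∀ y ∈ clauses.flatten, y ≤ 0) := by
    rw [show (((clauses.flatten.countP (fun x => decide (x > 0))) : Int) = 0)
        ↔ (clauses.flatten.countP (fun x => decide (x > 0)) = 0) by exact_mod_cast Iff.rfl,
      List.countP_eq_zero]
    simp
  rcases eq_or_ne clauses.flatten [] with hfl | hfl
  · simp [hfl]
  · rw [if_neg hfl]
    by_cases hp : ∀ y ∈ clauses.flatten, y > 0
    · rw [if_pos hp, if_pos (hneg.mpr hp),
        if_pos (show (1 : Int) = 0 ∨ (1 : Int) = 1 by norm_num)]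
    · rw [if_neg hp, if_neg (fun h => hp (hneg.mp h))]
      by_cases hn : ∀ y ∈ clauses.flatten, y ≤ 0
      · rw [if_pos hn, if_pos (hpos.mpr hn),
          if_neg (show ¬ ((2 : Int) = 0 ∨ (2 : Int) = 1) by norm_num),
          if_pos (show (2 : Int) = 2 from rfl)]
      · rw [if_neg hn, if_neg (fun h => hn (hpos.mp h)),
          if_neg (show ¬ ((3 : Int) = 0 ∨ (3 : Int) = 1) by norm_num),
          if_neg (show ¬ ((3 : Int) = 2) by norm_num)]
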